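-- pv_equiv track=rewrite | github.com/hamza24010/CNS_Kamerasiz | CNS/original program/mainS.py | compare_last_two
-- ===== SOURCE A (Python) =====
-- def compare_last_two(lst):
--     if len(lst) < 3:
--         return False
--     last_two = lst[-2:]
--     others = lst[:-2]
--     for val in others:
--         if val >= min(last_two):
--             return False
--     return True
-- ===== SOURCE B (Python) =====
-- def compare_last_two(lst):
--     if len(lst) < 3:
--         return False
--     m = lst[-2] if lst[-2] < lst[-1] else lst[-1]
--     count = 0
--     for v in lst:
--         if v >= m:
--             count += 1
--     return count == 2
-- ===== Notes on version B (the rewrite author's own statement) =====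
-- stated objective: alternative
-- what changed: Instead of slicing off the prefix and short-circuit checking each prefix element against a per-iteration min(last_two) call, B counts over the whole unsliced list how many elements are >= the smaller of the last two and returns whether that count is exactly 2 (the two trailing elements themselves).
import Mathlib
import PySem

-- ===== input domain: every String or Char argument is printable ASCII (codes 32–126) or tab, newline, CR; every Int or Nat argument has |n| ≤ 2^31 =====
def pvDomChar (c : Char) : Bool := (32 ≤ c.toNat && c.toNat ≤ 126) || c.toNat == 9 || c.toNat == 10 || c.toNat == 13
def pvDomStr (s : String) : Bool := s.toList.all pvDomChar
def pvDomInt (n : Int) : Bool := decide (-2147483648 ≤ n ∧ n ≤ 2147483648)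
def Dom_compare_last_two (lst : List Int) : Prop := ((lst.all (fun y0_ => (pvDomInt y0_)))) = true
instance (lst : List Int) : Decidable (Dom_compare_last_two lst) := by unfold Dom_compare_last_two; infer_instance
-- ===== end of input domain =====

-- B drops A's prefix slice and short-circuit loop: it counts, over the whole list, the elements ≥ min of the last two and tests count == 2; objective: alternative.

-- ===== PORT A =====
-- the 'for val in others: if val >= m: return False' loop
def pvLoopA (others : List Int) (m : Int) : Bool :=
  match others with
  | [] => true
  | v :: rest => if v ≥ m then false else pvLoopA rest m

def compare_last_two (lst : List Int) : Bool :=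
  if lst.length < 3 then false
  else
    let last_two := PySem.List.slice lst (some (-2)) none
    let others := PySem.List.slice lst none (some (-2))
    match PySem.List.min? last_two (fun x => x) with
    | some m => pvLoopA others m
    | none => true  -- unreachable: last_two nonempty when len ≥ 3

-- ===== PORT B =====
def compare_last_two_alt (lst : List Int) : Bool :=
  if lst.length < 3 then false
  else
    match PySem.List.pyGet? lst (-2), PySem.List.pyGet? lst (-1) with
    | some x, some y =>
        let m := if x < y then x else y
        (lst.foldl (fun acc v => if v ≥ m then acc + 1 else acc) (0 : Int)) == 2
    | _, _ => false  -- unreachable: len ≥ 3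

-- ===== PRECONDITION & SPEC =====
def Spec_compare_last_two (lst : List Int) (out : Bool) : Prop := out = compare_last_two_alt lst
instance (lst : List Int) (out : Bool) : Decidable (Spec_compare_last_two lst out) := by unfold Spec_compare_last_two; infer_instance

-- ===== CLAIM (what is proved, stated in full; the proofs are below) =====
def Claim_equal_compare_last_two : Prop := ∀ (lst : List Int), Dom_compare_last_two lst → Spec_compare_last_two lst (compare_last_two lst)

-- ===== LEMMAS AND PROOFS =====

-- A's loop returns true iff every prefix element is below m
lemma pvLoopA_eq_all (others : List Int) (m : Int) :
    pvLoopA others m = others.all (fun v => decide (v < m)) := by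
  induction others with
  | nil => rfl
  | cons v rest ih =>
    simp only [pvLoopA, List.all_cons, ih]
    by_cases h : v ≥ m
    · simp [h, show ¬ v < m by omega]
    · simp [h, show v < m by omega]

-- ===== VERDICT (by name: the statement is the Claim_ definition above) =====
theorem compare_last_two_spec : Claim_equal_compare_last_two := by
  intro lst _
  unfold Spec_compare_last_two compare_last_two compare_last_two_alt
  by_cases hlen : lst.length < 3
  · simp [hlen]
  · simp only [hlen, if_false]
    have hlen3 : 3 ≤ lst.length := by omega
    -- decompose lst = prefix ++ [a, b]
    have hsplit : lst = lst.take (lst.length - 2) ++ lst.drop (lst.length - 2) :=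
      (List.take_append_drop _ _).symm
    have hdlen : (lst.drop (lst.length - 2)).length = 2 := by
      simp; omega
    obtain ⟨a, b, hab⟩ : ∃ a b, lst.drop (lst.length - 2) = [a, b] := by
      rcases e : lst.drop (lst.length - 2) with _ | ⟨a, _ | ⟨b, _ | _⟩⟩ <;>
        simp [e] at hdlen ⊢
    have hlast : PySem.List.slice lst (some (-2)) none = [a, b] := by
      rw [PySem.List.slice_from_neg_ofNat lst 2 (by omega), hab]
    have hpre : PySem.List.slice lst none (some (-2)) = lst.take (lst.length - 2) :=
      PySem.List.slice_to_neg_ofNat lst 2 (by omega)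
    have hg2 : PySem.List.pyGet? lst (-2) = some a := by
      rw [PySem.List.pyGet?_neg_ofNat lst 2 (by omega) (by omega)]
      have h0 : lst[lst.length - 2]? = (lst.drop (lst.length - 2))[0]? := by
        simp [List.getElem?_drop]
      rw [h0, hab]; rfl
    have hg1 : PySem.List.pyGet? lst (-1) = some b := by
      rw [PySem.List.pyGet?_neg_one]
      conv_lhs => rw [hsplit, hab]
      simp
    rw [hlast, hpre, hg2, hg1]
    have hmin : PySem.List.min? [a, b] (fun x => x) = some (min a b) := by
      rw [PySem.List.min?_id_cons]; rfl
    rw [hmin]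
    set m : Int := min a b with hm
    have hm' : (if a < b then a else b) = m := by
      rw [hm, min_def]; split_ifs <;> omega
    simp only [hm']
    -- B's fold is 0 + countP
    rw [PySem.List.foldl_ite_add_one]
    -- countP over whole list = countP prefix + 2
    have hcount : lst.countP (fun v => decide (v ≥ m))
        = (lst.take (lst.length - 2)).countP (fun v => decide (v ≥ m)) + 2 := by
      conv_lhs => rw [hsplit, hab]
      rw [List.countP_append]
      have ha : a ≥ m := by rw [hm]; exact min_le_left a b
      have hb : b ≥ m := by rw [hm]; exact min_le_right a b
      simp [ha, hb]
    rw [pvLoopA_eq_all]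
    rw [hcount]
    by_cases h0 : (lst.take (lst.length - 2)).countP (fun v => decide (v ≥ m)) = 0
    · have hA : (lst.take (lst.length - 2)).all (fun v => decide (v < m)) = true := by
        rw [List.all_eq_true]; intro v hv
        have := List.countP_eq_zero.mp h0 v hv
        simp at this ⊢; omega
      rw [hA, h0]; norm_num
    · have hA : (lst.take (lst.length - 2)).all (fun v => decide (v < m)) = false := by
        by_contra hc
        rw [Bool.not_eq_false, List.all_eq_true] at hc
        apply h0; rw [List.countP_eq_zero]; intro v hv
        have := hc v hv; simp at this ⊢; omega
      rw [hA]; symm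
      rw [Bool.eq_false_iff]
      simp only [ne_eq, beq_iff_eq]
      push_cast
      omega
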